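-- pv_equiv track=rewrite | github.com/zhangyuan0102/Data-Structures-and-Algorithms-Specialization | 6b04_Programming-Assignment-3/suffix_array_long/suffix_array_long.py | buildclass
-- ===== SOURCE A (Python) =====
-- def buildclass(text, order):
--     n = len(text)
--     classes = [0] * n
--     classes[order[0]] = 0
--
--     for i in range(1, n):
--         if text[order[i]] != text[order[i - 1]]:
--             classes[order[i]] = classes[order[i - 1]] + 1
--         else:
--             classes[order[i]] = classes[order[i - 1]]
--
--     return classes
-- ===== SOURCE B (Python) =====
-- def buildclass(text, order):
--     n = len(text)
--     # characters in sorted-suffix order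
--     chars = [text[order[i]] for i in range(n)]
--     # start index of every maximal run of equal characters
--     starts = [i for i in range(n) if i == 0 or chars[i] != chars[i - 1]]
--     starts.append(n)
--     # the class of every position in run g is the run's index g
--     classes = [0] * n
--     for g in range(len(starts) - 1):
--         for i in range(starts[g], starts[g + 1]):
--             classes[order[i]] = g
--     return classes
-- ===== Notes on version B (the rewrite author's own statement) =====
-- stated objective: alternative
-- what changed: A fills classes in one scan that reads back the class it just wrote and increments on a character change; B is run-based: it lists the start index of every maximal run of equal characters in sorted order and then fills each run's positions with the run's index g via nested loops, with no carried class accumulator and no read of the output array.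
-- crash fix: On empty text A always raises IndexError (classes[order[0]] indexes the empty classes list, or order[0] the empty order), while B returns []. — e.g. on buildclass("", []): A raises IndexError, B returns []
import Mathlib
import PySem

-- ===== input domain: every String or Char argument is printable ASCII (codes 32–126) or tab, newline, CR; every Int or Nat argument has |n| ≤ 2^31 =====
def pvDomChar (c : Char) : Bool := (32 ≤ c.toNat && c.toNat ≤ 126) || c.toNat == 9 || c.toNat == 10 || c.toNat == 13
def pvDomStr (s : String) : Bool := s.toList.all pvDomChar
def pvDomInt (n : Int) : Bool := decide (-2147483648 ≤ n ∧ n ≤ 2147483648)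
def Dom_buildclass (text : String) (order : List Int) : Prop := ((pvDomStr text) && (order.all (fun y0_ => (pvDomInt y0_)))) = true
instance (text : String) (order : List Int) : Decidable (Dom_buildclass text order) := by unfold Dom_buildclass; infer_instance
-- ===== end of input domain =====

-- B is run-based: it lists the start of every maximal run of equal characters in sorted
-- order and fills each run with its index, instead of A's carried read-back accumulator;
-- objective: alternative.

-- ===== PORT A =====
def buildclass (text : String) (order : List Int) : List Int :=
  let tl := text.toList
  let n := tl.length
  let classes0 := List.replicate n (0 : Int)
  let classes1 := PySem.List.pySetD classes0 (PySem.List.pyGetD order 0 0) 0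
  (PySem.List.pyRange 1 (n : Int)).foldl (fun classes i =>
    if PySem.List.pyGetD tl (PySem.List.pyGetD order i 0) ' '
        ≠ PySem.List.pyGetD tl (PySem.List.pyGetD order (i - 1) 0) ' ' then
      PySem.List.pySetD classes (PySem.List.pyGetD order i 0)
        (PySem.List.pyGetD classes (PySem.List.pyGetD order (i - 1) 0) 0 + 1)
    else
      PySem.List.pySetD classes (PySem.List.pyGetD order i 0)
        (PySem.List.pyGetD classes (PySem.List.pyGetD order (i - 1) 0) 0)) classes1

-- ===== PORT B =====
def buildclass_alt (text : String) (order : List Int) : List Int :=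
  let tl := text.toList
  let n := tl.length
  -- chars = [text[order[i]] for i in range(n)]
  let chars := (PySem.List.pyRange 0 (n : Int)).map
    (fun i => PySem.List.pyGetD tl (PySem.List.pyGetD order i 0) ' ')
  -- starts = [i for i in range(n) if i == 0 or chars[i] != chars[i-1]]; starts.append(n)
  let starts := (PySem.List.pyRange 0 (n : Int)).filter
    (fun i => i == 0 || (PySem.List.pyGetD chars i ' ' != PySem.List.pyGetD chars (i - 1) ' '))
  let starts := starts ++ [(n : Int)]
  -- for g in range(len(starts)-1): for i in range(starts[g], starts[g+1]): classes[order[i]] = g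
  (PySem.List.pyRange 0 ((starts.length : Int) - 1)).foldl (fun classes g =>
    (PySem.List.pyRange (PySem.List.pyGetD starts g 0) (PySem.List.pyGetD starts (g + 1) 0)).foldl
      (fun classes i => PySem.List.pySetD classes (PySem.List.pyGetD order i 0) g) classes)
    (List.replicate n (0 : Int))

-- ===== PRECONDITION & SPEC =====
-- Pre_ excludes exactly the inputs where A raises IndexError: empty text, an order list
-- shorter than the text, or an order entry among the first len(text) outside [-n, n).
def Pre_buildclass (text : String) (order : List Int) : Prop :=
  text.toList.length ≠ 0 ∧ text.toList.length ≤ order.length ∧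
  ∀ x ∈ order.take text.toList.length, PySem.Raise.InRange text.toList.length x

instance (text : String) (order : List Int) : Decidable (Pre_buildclass text order) := by
  unfold Pre_buildclass; infer_instance

def pvWitness_buildclass : String × List Int := ("aba", [2, 0, 1])

-- On empty text A always raises IndexError (classes[order[0]] indexes the empty classes
-- list, or order[0] the empty order), while B returns [].
def Raises_buildclass (text : String) (order : List Int) : Prop :=
  text.toList.length = 0

instance (text : String) (order : List Int) : Decidable (Raises_buildclass text order) := by
  unfold Raises_buildclass; infer_instance

def pvRaiseWitness_buildclass : String × List Int := ("", [])
def pvRaiseWitnessOut_buildclass : List Int := []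

def Spec_buildclass (text : String) (order : List Int) (out : List Int) : Prop :=
  out = buildclass_alt text order
instance (text : String) (order : List Int) (out : List Int) : Decidable (Spec_buildclass text order out) := by unfold Spec_buildclass; infer_instance

-- ===== CLAIM (what is proved, stated in full; the proofs are below) =====
def Claim_equal_buildclass : Prop := ∀ (text : String) (order : List Int), Dom_buildclass text order → Pre_buildclass text order → Spec_buildclass text order (buildclass text order)
def Claim_raises_buildclass : Prop := (∀ (text : String) (order : List Int), Dom_buildclass text order → Raises_buildclass text order → ¬ Pre_buildclass text order) ∧ (Dom_buildclass (pvRaiseWitness_buildclass.1) (pvRaiseWitness_buildclass.2) ∧ Raises_buildclass (pvRaiseWitness_buildclass.1) (pvRaiseWitness_buildclass.2) ∧ buildclass_alt (pvRaiseWitness_buildclass.1) (pvRaiseWitness_buildclass.2) = pvRaiseWitnessOut_buildclass)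

-- ===== LEMMAS AND PROOFS =====

-- canonical Nat index of a Python index i into a list of length n
def pyNat (n : ℕ) (i : ℤ) : ℕ := if 0 ≤ i then i.toNat else n - (-i).toNat

theorem pyNat_lt {n : ℕ} {i : ℤ} (h : PySem.Raise.InRange n i) : pyNat n i < n := by
  rcases h with ⟨h1, h2⟩
  unfold pyNat
  split_ifs with h0 <;> omega

theorem pyIdx?_inRange {n : ℕ} {i : ℤ} (h : PySem.Raise.InRange n i) :
    PySem.List.pyIdx? n i = some (pyNat n i) := by
  rcases h with ⟨h1, h2⟩
  unfold PySem.List.pyIdx? pyNat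
  split_ifs <;> simp_all

theorem pyGetD_inRange {α : Type} (xs : List α) (i : ℤ) (d : α)
    (h : PySem.Raise.InRange xs.length i) :
    PySem.List.pyGetD xs i d = xs.getD (pyNat xs.length i) d := by
  unfold PySem.List.pyGetD PySem.List.pyGet?
  rw [pyIdx?_inRange h]
  simp [List.getD_eq_getElem?_getD]

theorem pySetD_inRange {α : Type} (xs : List α) (i : ℤ) (v : α)
    (h : PySem.Raise.InRange xs.length i) :
    PySem.List.pySetD xs i v = xs.set (pyNat xs.length i) v := by
  unfold PySem.List.pySetD PySem.List.pySet?
  rw [pyIdx?_inRange h]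
  rfl

-- canonical index of order[j]
def oidx (n : ℕ) (order : List Int) (j : ℕ) : ℕ := pyNat n (order.getD j 0)
-- character of the j-th sorted suffix
def ch (tl : List Char) (order : List Int) (j : ℕ) : Char :=
  tl.getD (oidx tl.length order j) ' '
-- rank of the j-th sorted suffix
def rnk (tl : List Char) (order : List Int) : ℕ → ℤ
  | 0 => 0
  | j + 1 => rnk tl order j + (if ch tl order (j + 1) ≠ ch tl order j then 1 else 0)
-- scatter of the first k ranks back to text positions
def scat (tl : List Char) (order : List Int) : ℕ → List Int
  | 0 => List.replicate tl.length 0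
  | k + 1 => (scat tl order k).set (oidx tl.length order k) (rnk tl order k)

theorem length_scat (tl : List Char) (order : List Int) (k : ℕ) :
    (scat tl order k).length = tl.length := by
  induction k with
  | zero => simp [scat]
  | succ k ih => simp [scat, ih]

theorem pyRange_self (a : ℤ) : PySem.List.pyRange a a = [] := by
  apply List.eq_nil_iff_forall_not_mem.2
  intro x hx
  rw [PySem.List.mem_pyRange_one] at hx
  omega

-- a Pre_-style hypothesis gives in-range order entries pointwise
theorem hin_of_pre {tl : List Char} {order : List Int}
    (hle : tl.length ≤ order.length)
    (hall : ∀ x ∈ order.take tl.length, PySem.Raise.InRange tl.length x)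
    {j : ℕ} (hj : j < tl.length) :
    PySem.Raise.InRange tl.length (order.getD j 0) := by
  have hjl : j < order.length := lt_of_lt_of_le hj hle
  have hmem : order[j] ∈ order.take tl.length := by
    have : (order.take tl.length)[j]'(by simp; omega) ∈ order.take tl.length :=
      List.getElem_mem _
    simpa using this
  have h := hall _ hmem
  have hgd : order.getD j 0 = order[j] := by
    rw [List.getD_eq_getElem?_getD, List.getElem?_eq_getElem hjl]; rfl
  rw [hgd]; exact h

-- reading back the value just written: scat (k+1) at index order[k]
theorem scat_read {tl : List Char} {order : List Int} {k : ℕ}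
    (hk : PySem.Raise.InRange tl.length (order.getD k 0)) :
    PySem.List.pyGetD (scat tl order (k + 1)) (order.getD k 0) 0 = rnk tl order k := by
  have hlen : (scat tl order (k + 1)).length = tl.length := length_scat tl order (k + 1)
  rw [pyGetD_inRange _ _ _ (by rw [hlen]; exact hk)]
  rw [hlen]
  have hidx : oidx tl.length order k < tl.length := pyNat_lt hk
  simp only [scat, oidx]
  rw [List.getD_eq_getElem?_getD, List.getElem?_set_self (by rw [length_scat]; exact hidx)]
  simp

-- ===== A reduces to scat =====

theorem A_loop (tl : List Char) (order : List Int)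
    (hle : tl.length ≤ order.length)
    (hall : ∀ x ∈ order.take tl.length, PySem.Raise.InRange tl.length x)
    (k : ℕ) (h1 : 1 ≤ k) (hkn : k ≤ tl.length) :
    (PySem.List.pyRange 1 (k : Int)).foldl (fun classes i =>
      if PySem.List.pyGetD tl (PySem.List.pyGetD order i 0) ' '
          ≠ PySem.List.pyGetD tl (PySem.List.pyGetD order (i - 1) 0) ' ' then
        PySem.List.pySetD classes (PySem.List.pyGetD order i 0)
          (PySem.List.pyGetD classes (PySem.List.pyGetD order (i - 1) 0) 0 + 1)
      else
        PySem.List.pySetD classes (PySem.List.pyGetD order i 0)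
          (PySem.List.pyGetD classes (PySem.List.pyGetD order (i - 1) 0) 0))
      (scat tl order 1) = scat tl order k := by
  induction k with
  | zero => omega
  | succ k ih =>
    rcases Nat.eq_zero_or_pos k with hk0 | hkpos
    · subst hk0
      norm_num [pyRange_self]
    · have hkn' : k ≤ tl.length := by omega
      have hcast : ((k + 1 : ℕ) : Int) = (k : Int) + 1 := by push_cast; ring
      rw [hcast, PySem.List.pyRange_one_succ_right (by exact_mod_cast hkpos), List.foldl_append,
        ih hkpos hkn']
      have hkin : PySem.Raise.InRange tl.length (order.getD k 0) :=
        hin_of_pre hle hall (by omega)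
      have hk1in : PySem.Raise.InRange tl.length (order.getD (k - 1) 0) :=
        hin_of_pre hle hall (by omega)
      have e1 : PySem.List.pyGetD order (k : Int) 0 = order.getD k 0 := by
        simp [PySem.List.pyGetD_natCast]
      have e2 : ((k : Int) - 1) = ((k - 1 : ℕ) : Int) := by omega
      have e3 : PySem.List.pyGetD order ((k : Int) - 1) 0 = order.getD (k - 1) 0 := by
        rw [e2]; simp [PySem.List.pyGetD_natCast]
      have hsk : scat tl order k = scat tl order ((k - 1) + 1) := by
        congr 1; omega
      have hread : PySem.List.pyGetD (scat tl order k) (order.getD (k - 1) 0) 0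
          = rnk tl order (k - 1) := by
        rw [hsk]; exact scat_read hk1in
      have hchk : PySem.List.pyGetD tl (order.getD k 0) ' ' = ch tl order k := by
        rw [pyGetD_inRange _ _ _ hkin]; rfl
      have hchk1 : PySem.List.pyGetD tl (order.getD (k - 1) 0) ' ' = ch tl order (k - 1) := by
        rw [pyGetD_inRange _ _ _ hk1in]; rfl
      have hset : ∀ v : Int, PySem.List.pySetD (scat tl order k) (order.getD k 0) v
          = (scat tl order k).set (oidx tl.length order k) v := by
        intro v
        rw [pySetD_inRange _ _ _ (by rw [length_scat]; exact hkin)]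
        rw [length_scat]; rfl
      simp only [List.foldl_cons, List.foldl_nil, e1, e3, hread, hchk, hchk1, hset]
      have hrnk : rnk tl order k = rnk tl order (k - 1)
          + (if ch tl order k ≠ ch tl order (k - 1) then 1 else 0) := by
        have hk1 : (k - 1) + 1 = k := by omega
        conv_lhs => rw [← hk1]
        rw [rnk, hk1]
      by_cases hc : ch tl order k ≠ ch tl order (k - 1)
      · simp only [if_pos hc]
        rw [show (scat tl order (k+1)) = (scat tl order k).set (oidx tl.length order k) (rnk tl order k) from rfl]
        rw [hrnk, if_pos hc]
      · simp only [if_neg hc]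
        rw [show (scat tl order (k+1)) = (scat tl order k).set (oidx tl.length order k) (rnk tl order k) from rfl]
        rw [hrnk, if_neg hc]
        simp

theorem A_eq_scat (text : String) (order : List Int)
    (hpre : Pre_buildclass text order) :
    buildclass text order = scat text.toList order text.toList.length := by
  obtain ⟨hne, hle, hall⟩ := hpre
  set tl := text.toList with htl
  have h0in : PySem.Raise.InRange tl.length (order.getD 0 0) :=
    hin_of_pre hle hall (by omega)
  unfold buildclass
  have hinit : PySem.List.pySetD (List.replicate tl.length (0 : Int))
      (PySem.List.pyGetD order 0 0) 0 = scat tl order 1 := by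
    rw [PySem.List.pyGetD_zero]
    rw [pySetD_inRange _ _ _ (by simpa using h0in)]
    simp only [scat, List.length_replicate, oidx, rnk]
  simp only [← htl]
  rw [hinit]
  exact A_loop tl order hle hall tl.length (by omega) le_rfl

-- ===== B reduces to scat =====

-- is sorted position j the start of a maximal run of equal characters?
def isStart (tl : List Char) (order : List Int) (j : ℕ) : Bool :=
  (j == 0) || (ch tl order j != ch tl order (j - 1))

-- the Nat-level run-start list
def SN (tl : List Char) (order : List Int) : List ℕ :=
  (List.range tl.length).filter (isStart tl order)

-- the g-th run boundary (defaulting to n past the end)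
def eB (tl : List Char) (order : List Int) (g : ℕ) : ℕ :=
  (SN tl order).getD g tl.length

theorem SN_pairwise (tl : List Char) (order : List Int) :
    (SN tl order).Pairwise (· < ·) :=
  (List.pairwise_lt_range).filter _

theorem mem_SN (tl : List Char) (order : List Int) (j : ℕ) :
    j ∈ SN tl order ↔ j < tl.length ∧ isStart tl order j = true := by
  simp [SN, List.mem_filter]

theorem eB_lt (tl : List Char) (order : List Int) {g : ℕ} (hg : g < (SN tl order).length) :
    eB tl order g < tl.length := by
  have hmem : (SN tl order)[g] ∈ SN tl order := List.getElem_mem _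
  rw [mem_SN] at hmem
  have : eB tl order g = (SN tl order)[g] := by
    simp [eB, List.getD_eq_getElem?_getD, List.getElem?_eq_getElem hg]
  omega

theorem eB_le (tl : List Char) (order : List Int) (g : ℕ) :
    eB tl order g ≤ tl.length := by
  by_cases hg : g < (SN tl order).length
  · exact le_of_lt (eB_lt tl order hg)
  · simp [eB, List.getD_eq_getElem?_getD, List.getElem?_eq_none (by omega : (SN tl order).length ≤ g)]

theorem eB_zero (tl : List Char) (order : List Int) (hn : 0 < tl.length) :
    eB tl order 0 = 0 := by
  have h0 : (0 : ℕ) ∈ SN tl order := by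
    rw [mem_SN]
    exact ⟨hn, by simp [isStart]⟩
  obtain ⟨k, hk, hEq⟩ := List.mem_iff_getElem.1 h0
  have hkz : k = 0 := by
    by_contra hkz
    have := (List.pairwise_iff_getElem.1 (SN_pairwise tl order)) 0 k (by omega) hk (by omega)
    omega
  subst hkz
  simp [eB, List.getD_eq_getElem?_getD, List.getElem?_eq_getElem hk, hEq]

theorem eB_mono (tl : List Char) (order : List Int) {g : ℕ}
    (hg : g < (SN tl order).length) :
    eB tl order g < eB tl order (g + 1) := by
  by_cases hg1 : g + 1 < (SN tl order).length
  · have := (List.pairwise_iff_getElem.1 (SN_pairwise tl order)) g (g + 1) hg hg1 (by omega)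
    have e1 : eB tl order g = (SN tl order)[g] := by
      simp [eB, List.getD_eq_getElem?_getD, List.getElem?_eq_getElem hg]
    have e2 : eB tl order (g + 1) = (SN tl order)[g + 1] := by
      simp [eB, List.getD_eq_getElem?_getD, List.getElem?_eq_getElem hg1]
    omega
  · have e2 : eB tl order (g + 1) = tl.length := by
      simp [eB, List.getD_eq_getElem?_getD,
        List.getElem?_eq_none (by omega : (SN tl order).length ≤ g + 1)]
    have := eB_lt tl order hg
    omega

theorem eB_last (tl : List Char) (order : List Int) :
    eB tl order (SN tl order).length = tl.length := by
  simp [eB, List.getD_eq_getElem?_getD, List.getElem?_eq_none (le_refl (SN tl order).length)]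

-- no run start strictly inside a run
theorem gap (tl : List Char) (order : List Int) {g i : ℕ}
    (hg : g < (SN tl order).length)
    (h1 : eB tl order g < i) (h2 : i < eB tl order (g + 1)) :
    isStart tl order i = false := by
  by_contra hq
  have hq' : isStart tl order i = true := by
    cases h : isStart tl order i
    · exact absurd h hq
    · rfl
  have hin : i < tl.length := lt_of_lt_of_le h2 (eB_le tl order (g + 1))
  have hmem : i ∈ SN tl order := (mem_SN tl order i).2 ⟨hin, hq'⟩
  obtain ⟨k, hk, hEq⟩ := List.mem_iff_getElem.1 hmem
  have e1 : eB tl order g = (SN tl order)[g] := by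
    simp [eB, List.getD_eq_getElem?_getD, List.getElem?_eq_getElem hg]
  have hgk : g < k := by
    by_contra hgk
    rcases Nat.lt_or_ge k g with hlt | hge
    · have := (List.pairwise_iff_getElem.1 (SN_pairwise tl order)) k g hk hg hlt
      omega
    · have hkg : k = g := by omega
      subst hkg
      omega
  by_cases hg1 : g + 1 < (SN tl order).length
  · have e2 : eB tl order (g + 1) = (SN tl order)[g + 1] := by
      simp [eB, List.getD_eq_getElem?_getD, List.getElem?_eq_getElem hg1]
    rcases Nat.lt_or_ge (g + 1) k with hlt | hge
    · have := (List.pairwise_iff_getElem.1 (SN_pairwise tl order)) (g + 1) k hg1 hk hlt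
      omega
    · have hkg : k = g + 1 := by omega
      subst hkg
      omega
  · omega

-- rnk is constant on a run
theorem rnk_run (tl : List Char) (order : List Int) {g : ℕ}
    (hg : g < (SN tl order).length) :
    ∀ i, eB tl order g ≤ i → i < eB tl order (g + 1) →
      rnk tl order i = rnk tl order (eB tl order g) := by
  intro i
  induction i with
  | zero =>
    intro h1 _
    have : eB tl order g = 0 := by omega
    rw [this]
  | succ i ih =>
    intro h1 h2
    rcases Nat.lt_or_ge (eB tl order g) (i + 1) with hlt | hge
    · have hns : isStart tl order (i + 1) = false := gap tl order hg hlt h2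
      have hceq : ch tl order (i + 1) = ch tl order i := by
        simp only [isStart] at hns
        have := (Bool.or_eq_false_iff.1 hns).2
        simpa [bne_iff_ne] using this
      rw [rnk, hceq, if_neg (fun h => h rfl), add_zero]
      exact ih (by omega) (by omega)
    · have : eB tl order g = i + 1 := by omega
      rw [this]

-- the rank at the start of run g is g
theorem rnk_start (tl : List Char) (order : List Int) :
    ∀ g, g < (SN tl order).length → rnk tl order (eB tl order g) = (g : ℤ) := by
  intro g
  induction g with
  | zero =>
    intro hg
    have hn : 0 < tl.length := lt_of_le_of_lt (Nat.zero_le _) (eB_lt tl order hg)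
    rw [eB_zero tl order hn]
    rfl
  | succ g ih =>
    intro hg1
    have hg : g < (SN tl order).length := by omega
    have hlt : eB tl order g < eB tl order (g + 1) := eB_mono tl order hg
    have hpos : 1 ≤ eB tl order (g + 1) := by omega
    have hmem : eB tl order (g + 1) ∈ SN tl order := by
      have : eB tl order (g + 1) = (SN tl order)[g + 1] := by
        simp [eB, List.getD_eq_getElem?_getD, List.getElem?_eq_getElem hg1]
      rw [this]; exact List.getElem_mem _
    have hst : isStart tl order (eB tl order (g + 1)) = true := ((mem_SN tl order _).1 hmem).2
    have hne : ch tl order (eB tl order (g + 1)) ≠ ch tl order (eB tl order (g + 1) - 1) := by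
      simp only [isStart] at hst
      rcases Bool.or_eq_true_iff.1 hst with h | h
      · exfalso; have : eB tl order (g + 1) = 0 := by simpa using h
        omega
      · exact bne_iff_ne.1 h
    have hsplit : eB tl order (g + 1) = (eB tl order (g + 1) - 1) + 1 := by omega
    rw [hsplit, rnk]
    have hprev : rnk tl order (eB tl order (g + 1) - 1) = (g : ℤ) := by
      rw [rnk_run tl order hg (eB tl order (g + 1) - 1) (by omega) (by omega)]
      exact ih hg
    rw [hprev]
    rw [← hsplit]
    rw [if_pos hne]
    push_cast
    ring

theorem rnk_val (tl : List Char) (order : List Int) {g i : ℕ}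
    (hg : g < (SN tl order).length)
    (h1 : eB tl order g ≤ i) (h2 : i < eB tl order (g + 1)) :
    rnk tl order i = (g : ℤ) := by
  rw [rnk_run tl order hg i h1 h2]
  exact rnk_start tl order g hg

-- the port's starts list (before appending n) is SN, cast to Int
theorem starts_eq (tl : List Char) (order : List Int)
    (hle : tl.length ≤ order.length)
    (hall : ∀ x ∈ order.take tl.length, PySem.Raise.InRange tl.length x) :
    (PySem.List.pyRange 0 (tl.length : Int)).filter
      (fun i => i == 0 ||
        (PySem.List.pyGetD ((PySem.List.pyRange 0 (tl.length : Int)).map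
            (fun i => PySem.List.pyGetD tl (PySem.List.pyGetD order i 0) ' ')) i ' '
          != PySem.List.pyGetD ((PySem.List.pyRange 0 (tl.length : Int)).map
            (fun i => PySem.List.pyGetD tl (PySem.List.pyGetD order i 0) ' ')) (i - 1) ' '))
      = (SN tl order).map (fun (j : ℕ) => (j : ℤ)) := by
  set chars := (PySem.List.pyRange 0 (tl.length : Int)).map
    (fun i => PySem.List.pyGetD tl (PySem.List.pyGetD order i 0) ' ') with hchars
  rw [PySem.List.pyRange_zero_natCast, List.filter_map, SN]
  refine congrArg (List.map (fun (j : ℕ) => (j : ℤ))) (List.filter_congr ?_)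
  intro j hj
  rw [List.mem_range] at hj
  rcases Nat.eq_zero_or_pos j with h0 | hpos
  · subst h0
    simp [isStart]
  · have hchj : PySem.List.pyGetD chars (j : ℤ) ' ' = ch tl order j := by
      rw [hchars]
      rw [PySem.List.pyGetD_map_pyRange _ tl.length j ' ' hj]
      rw [PySem.List.pyGetD_natCast]
      rw [pyGetD_inRange _ _ _ (hin_of_pre hle hall hj)]
      rfl
    have hcast : ((j : ℤ) - 1) = ((j - 1 : ℕ) : ℤ) := by omega
    have hchj1 : PySem.List.pyGetD chars ((j : ℤ) - 1) ' ' = ch tl order (j - 1) := by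
      rw [hchars, hcast]
      rw [PySem.List.pyGetD_map_pyRange _ tl.length (j - 1) ' ' (by omega)]
      rw [PySem.List.pyGetD_natCast]
      rw [pyGetD_inRange _ _ _ (hin_of_pre hle hall (by omega))]
      rfl
    have hz : ((j : ℤ) == 0) = false := by simp; omega
    have hjb : (j == 0) = false := by simp; omega
    simp only [Function.comp, hz, hchj, hchj1, isStart, hjb]

-- indexing the port's appended starts list
theorem starts_getD (tl : List Char) (order : List Int) {g : ℕ}
    (hg : g ≤ (SN tl order).length) :
    PySem.List.pyGetD ((SN tl order).map (fun (j : ℕ) => (j : ℤ)) ++ [(tl.length : ℤ)]) (g : ℤ) 0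
      = ((eB tl order g : ℕ) : ℤ) := by
  rw [PySem.List.pyGetD_natCast]
  rcases Nat.lt_or_ge g (SN tl order).length with hlt | hge
  · have hmap : g < ((SN tl order).map (fun (j : ℕ) => (j : ℤ))).length := by simpa using hlt
    rw [List.getD_eq_getElem?_getD, List.getElem?_append_left hmap,
      List.getElem?_eq_getElem hmap, List.getElem_map]
    have heg : eB tl order g = (SN tl order)[g] := by
      simp [eB, List.getD_eq_getElem?_getD, List.getElem?_eq_getElem hlt]
    rw [heg]
    rfl
  · have hgm : g = (SN tl order).length := by omega
    subst hgm
    have hmlen : ((SN tl order).map (fun (j : ℕ) => (j : ℤ))).length = (SN tl order).length := by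
      simp
    rw [List.getD_eq_getElem?_getD, List.getElem?_append_right (by omega), hmlen]
    have hend : eB tl order (SN tl order).length = tl.length := by
      simp [eB, List.getD_eq_getElem?_getD, List.getElem?_eq_none (le_refl (SN tl order).length)]
    rw [hend]
    simp

-- inner fold: filling one run [a, b) with the constant g extends scat from a to b
theorem B_inner (tl : List Char) (order : List Int)
    (hle : tl.length ≤ order.length)
    (hall : ∀ x ∈ order.take tl.length, PySem.Raise.InRange tl.length x)
    (g : ℤ) (a : ℕ) :
    ∀ b : ℕ, a ≤ b → b ≤ tl.length →
    (∀ i : ℕ, a ≤ i → i < b → rnk tl order i = g) →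
    (PySem.List.pyRange (a : ℤ) (b : ℤ)).foldl
      (fun classes i => PySem.List.pySetD classes (PySem.List.pyGetD order i 0) g)
      (scat tl order a) = scat tl order b := by
  intro b
  induction b with
  | zero =>
    intro hab _ _
    have : a = 0 := by omega
    subst this
    rw [show ((0 : ℕ) : ℤ) = 0 from rfl, pyRange_self]
    rfl
  | succ b ih =>
    intro hab hbn hval
    rcases Nat.lt_or_ge b a with hba | hba
    · have : a = b + 1 := by omega
      subst this
      rw [pyRange_self]
      rfl
    · have hcast : ((b + 1 : ℕ) : ℤ) = (b : ℤ) + 1 := by push_cast; ring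
      rw [hcast, PySem.List.pyRange_one_succ_right (by exact_mod_cast hba), List.foldl_append,
        ih hba (by omega) (fun i h1 h2 => hval i h1 (by omega))]
      have hbin : PySem.Raise.InRange tl.length (order.getD b 0) :=
        hin_of_pre hle hall (by omega)
      simp only [List.foldl_cons, List.foldl_nil, PySem.List.pyGetD_natCast]
      rw [pySetD_inRange _ _ _ (by rw [length_scat]; exact hbin)]
      rw [length_scat]
      rw [show scat tl order (b + 1)
          = (scat tl order b).set (oidx tl.length order b) (rnk tl order b) from rfl]
      rw [hval b hba (by omega)]
      rfl

-- outer fold: processing the first G runs builds scat up to the G-th boundary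
theorem B_outer (tl : List Char) (order : List Int)
    (hle : tl.length ≤ order.length)
    (hall : ∀ x ∈ order.take tl.length, PySem.Raise.InRange tl.length x)
    (hn : 0 < tl.length) :
    ∀ G : ℕ, G ≤ (SN tl order).length →
    (PySem.List.pyRange 0 (G : ℤ)).foldl (fun classes g =>
      (PySem.List.pyRange
          (PySem.List.pyGetD ((SN tl order).map (fun (j : ℕ) => (j : ℤ)) ++ [(tl.length : ℤ)]) g 0)
          (PySem.List.pyGetD ((SN tl order).map (fun (j : ℕ) => (j : ℤ)) ++ [(tl.length : ℤ)]) (g + 1) 0)).foldl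
        (fun classes i => PySem.List.pySetD classes (PySem.List.pyGetD order i 0) g) classes)
      (List.replicate tl.length (0 : Int)) = scat tl order (eB tl order G) := by
  intro G
  induction G with
  | zero =>
    intro _
    rw [show ((0 : ℕ) : ℤ) = 0 from rfl, pyRange_self]
    rw [eB_zero tl order hn]
    rfl
  | succ G ih =>
    intro hG1
    have hG : G < (SN tl order).length := by omega
    have hcast : ((G + 1 : ℕ) : ℤ) = (G : ℤ) + 1 := by push_cast; ring
    rw [hcast, PySem.List.pyRange_one_succ_right (by exact_mod_cast Nat.zero_le G),
      List.foldl_append, ih (by omega)]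
    simp only [List.foldl_cons, List.foldl_nil]
    rw [starts_getD tl order (le_of_lt hG)]
    rw [show ((G : ℤ) + 1) = ((G + 1 : ℕ) : ℤ) by push_cast; ring]
    rw [starts_getD tl order hG1]
    exact B_inner tl order hle hall (G : ℤ) (eB tl order G) (eB tl order (G + 1))
      (le_of_lt (eB_mono tl order hG)) (eB_le tl order (G + 1))
      (fun i h1 h2 => rnk_val tl order hG h1 h2)

theorem B_eq_scat (text : String) (order : List Int)
    (hpre : Pre_buildclass text order) :
    buildclass_alt text order = scat text.toList order text.toList.length := by
  obtain ⟨hne, hle, hall⟩ := hpre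
  set tl := text.toList with htl
  have hn : 0 < tl.length := by omega
  unfold buildclass_alt
  simp only [← htl]
  rw [starts_eq tl order hle hall]
  have hlen : (((SN tl order).map (fun (j : ℕ) => (j : ℤ)) ++ [(tl.length : ℤ)]).length : ℤ) - 1
      = ((SN tl order).length : ℤ) := by
    simp
  rw [hlen]
  rw [B_outer tl order hle hall hn (SN tl order).length le_rfl]
  rw [eB_last tl order]

-- ===== VERDICT (by name: the statement is the Claim_ definition above) =====
theorem buildclass_spec : Claim_equal_buildclass := by
  intro text order _ hpre
  unfold Spec_buildclass
  rw [A_eq_scat text order hpre, B_eq_scat text order hpre]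

@[simp] theorem buildclass_raises : Claim_raises_buildclass := by
  unfold Claim_raises_buildclass
  constructor
  · intro text order _ hr hpre
    exact hpre.1 hr
  · exact ⟨by decide, by decide, by decide⟩
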